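-- pv_equiv track=rewrite | github.com/LongWeeeeeee/bets | base/test_filters.py | is_early_match_stable3k_4min
-- ===== SOURCE A (Python) =====
-- from typing import Tuple, Optional, Dict, Any
--
-- def is_early_match_stable3k_4min(match: Dict) -> Tuple[bool, Optional[str]]:
--     """Stable lead >= 3k минимум 4 минуты подряд на 15-30."""
--     leads = match.get('radiantNetworthLeads', [])
--     duration = len(leads)
--
--     if duration < 30 or duration > 50:
--         return False, None
--
--     consecutive_r = 0
--     consecutive_d = 0
--
--     for i in range(15, min(30, duration)):
--         if leads[i] >= 3000:
--             consecutive_r += 1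
--             consecutive_d = 0
--             if consecutive_r >= 4:
--                 return True, 'radiant'
--         elif leads[i] <= -3000:
--             consecutive_d += 1
--             consecutive_r = 0
--             if consecutive_d >= 4:
--                 return True, 'dire'
--         else:
--             consecutive_r = 0
--             consecutive_d = 0
--
--     return False, None
-- ===== SOURCE B (Python) =====
-- def is_early_match_stable3k_4min(match):
--     """Categorise the 15:30 window once, then slide a fixed 4-wide window over it."""
--     leads = match.get('radiantNetworthLeads', [])
--     n = len(leads)
--     if n < 30 or n > 50:
--         return False, None
--     cats = ['radiant' if v >= 3000 else 'dire' if v <= -3000 else 'neither'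
--             for v in leads[15:30]]
--     for a, b, c, d in zip(cats, cats[1:], cats[2:], cats[3:]):
--         if a == b == c == d and a != 'neither':
--             return True, a
--     return False, None
-- ===== Notes on version B (the rewrite author's own statement) =====
-- stated objective: alternative
-- what changed: Replaces the stateful consecutive-counter scan with a two-pass pipeline: map the fixed leads[15:30] window to categories, then slide a 4-wide window over the category list looking for four equal non-'neither' entries.
import Mathlib
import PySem

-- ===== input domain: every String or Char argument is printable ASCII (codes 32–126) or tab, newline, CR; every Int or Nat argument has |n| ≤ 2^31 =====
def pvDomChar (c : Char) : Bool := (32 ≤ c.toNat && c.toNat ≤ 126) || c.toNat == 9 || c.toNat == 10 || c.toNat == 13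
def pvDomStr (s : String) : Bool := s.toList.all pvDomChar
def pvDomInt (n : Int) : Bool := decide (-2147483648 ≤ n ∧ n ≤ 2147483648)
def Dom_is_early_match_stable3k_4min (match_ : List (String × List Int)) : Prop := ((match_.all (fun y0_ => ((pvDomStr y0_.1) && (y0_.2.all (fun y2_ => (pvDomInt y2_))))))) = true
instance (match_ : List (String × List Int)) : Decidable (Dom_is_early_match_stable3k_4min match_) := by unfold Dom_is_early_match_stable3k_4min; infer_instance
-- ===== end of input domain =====

-- B replaces A's stateful consecutive-counter scan by a category map over leads[15:30]
-- followed by a sliding 4-wide window search; same return value everywhere.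

-- ===== PORT A =====
-- A's loop over range(15, min(30, duration)) with the two consecutive counters and early return.
-- The index is always in range (the loop only runs when duration ≥ 30), so pyGetD's default is never used.
def pvLoopA (leads : List Int) : List Int → Int → Int → Bool × Option String
  | [], _, _ => (false, none)
  | i :: rest, consecutive_r, consecutive_d =>
    let x := PySem.List.pyGetD leads i 0
    if x ≥ 3000 then
      if consecutive_r + 1 ≥ 4 then (true, some "radiant")
      else pvLoopA leads rest (consecutive_r + 1) 0
    else if x ≤ -3000 then
      if consecutive_d + 1 ≥ 4 then (true, some "dire")
      else pvLoopA leads rest 0 (consecutive_d + 1)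
    else pvLoopA leads rest 0 0

def is_early_match_stable3k_4min (match_ : List (String × List Int)) : Bool × Option String :=
  let leads := PySem.Dict.getD ⟨match_⟩ "radiantNetworthLeads" []
  let duration : Int := leads.length
  if duration < 30 ∨ duration > 50 then (false, none)
  else pvLoopA leads (PySem.List.pyRange 15 (min 30 duration) 1) 0 0

-- ===== PORT B =====
def pvCat (v : Int) : String :=
  if v ≥ 3000 then "radiant" else if v ≤ -3000 then "dire" else "neither"

-- the zip(cats, cats[1:], cats[2:], cats[3:]) sliding window: at each position check the
-- 4-wide window (fewer than 4 elements left = no window), else slide one to the right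
def pvWin4 : List String → Bool × Option String
  | [] => (false, none)
  | c :: rest =>
    if rest.take 3 = [c, c, c] ∧ c ≠ "neither" then (true, some c) else pvWin4 rest

def is_early_match_stable3k_4min_alt (match_ : List (String × List Int)) : Bool × Option String :=
  let leads := PySem.Dict.getD ⟨match_⟩ "radiantNetworthLeads" []
  let n : Int := leads.length
  if n < 30 ∨ n > 50 then (false, none)
  else pvWin4 ((PySem.List.slice leads (some 15) (some 30)).map pvCat)

-- ===== PRECONDITION & SPEC =====
def Spec_is_early_match_stable3k_4min (match_ : List (String × List Int)) (out : Bool × Option String) : Prop := out = is_early_match_stable3k_4min_alt match_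
instance (match_ : List (String × List Int)) (out : Bool × Option String) : Decidable (Spec_is_early_match_stable3k_4min match_ out) := by unfold Spec_is_early_match_stable3k_4min; infer_instance

-- ===== CLAIM (what is proved, stated in full; the proofs are below) =====
def Claim_equal_is_early_match_stable3k_4min : Prop := ∀ (match_ : List (String × List Int)), Dom_is_early_match_stable3k_4min match_ → Spec_is_early_match_stable3k_4min match_ (is_early_match_stable3k_4min match_)

-- ===== LEMMAS AND PROOFS =====

-- structural version of A's loop, on the window's elements instead of indices
def pvRunScan : List Int → Int → Int → Bool × Option String
  | [], _, _ => (false, none)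
  | x :: rest, cr, cd =>
    if x ≥ 3000 then
      if cr + 1 ≥ 4 then (true, some "radiant") else pvRunScan rest (cr + 1) 0
    else if x ≤ -3000 then
      if cd + 1 ≥ 4 then (true, some "dire") else pvRunScan rest 0 (cd + 1)
    else pvRunScan rest 0 0

lemma pvLoopA_eq_runScan (leads : List Int) :
    ∀ (n a : Nat) (cr cd : Int), a + n ≤ leads.length →
      pvLoopA leads (PySem.List.pyRange (a : Int) ((a : Int) + (n : Int)) 1) cr cd
        = pvRunScan ((leads.drop a).take n) cr cd := by
  intro n
  induction n with
  | zero =>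
    intro a cr cd _
    simp [pvLoopA, pvRunScan, PySem.List.pyRange]
  | succ m ih =>
    intro a cr cd h
    have ha : a < leads.length := by omega
    have hcons : PySem.List.pyRange (a : Int) ((a : Int) + ((m : Int) + 1)) 1
        = (a : Int) :: PySem.List.pyRange ((a : Int) + 1) ((a : Int) + ((m : Int) + 1)) 1 :=
      PySem.List.pyRange_one_cons (by omega)
    have hdrop : leads.drop a = leads[a] :: leads.drop (a + 1) :=
      List.drop_eq_getElem_cons ha
    have hget : PySem.List.pyGetD leads (a : Int) 0 = leads[a] := by
      simp [PySem.List.pyGetD_natCast, List.getD, ha]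
    have ihm := ih (a + 1) ; push_cast at ihm
    push_cast
    rw [hcons, hdrop]
    simp only [pvLoopA, pvRunScan, List.take_succ_cons, hget]
    rw [show ((a : Int) + ((m : Int) + 1)) = ((a : Int) + 1) + (m : Int) by ring]
    split_ifs <;> first
      | rfl
      | exact ihm _ _ (by omega)

lemma pvWin4_replicate (c : String) (k : Nat) (hk : k ≤ 3) :
    pvWin4 (List.replicate k c) = (false, none) := by
  interval_cases k <;> simp [pvWin4, List.replicate]

lemma pvWin4_skip (c y : String) (ys : List String) (k : Nat) (hk : k ≤ 3) (hne : y ≠ c) :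
    pvWin4 (List.replicate k c ++ y :: ys) = pvWin4 (y :: ys) := by
  interval_cases k <;>
    simp [pvWin4, List.replicate, hne]

lemma pvRunScan_eq_win4 (xs : List Int) :
    ∀ (cr cd : Int), 0 ≤ cr → cr ≤ 3 → 0 ≤ cd → cd ≤ 3 → (cr = 0 ∨ cd = 0) →
      pvRunScan xs cr cd
        = pvWin4 (List.replicate cr.toNat "radiant" ++ List.replicate cd.toNat "dire"
            ++ xs.map pvCat) := by
  induction xs with
  | nil =>
    intro cr cd h0 h3 h0' h3' hor
    have hz : pvWin4 (List.replicate cr.toNat "radiant" ++ List.replicate cd.toNat "dire"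
        ++ ([] : List Int).map pvCat) = (false, none) := by
      rcases hor with h | h
      · rw [h]; simpa using pvWin4_replicate "dire" cd.toNat (by omega)
      · rw [h]; simpa using pvWin4_replicate "radiant" cr.toNat (by omega)
    rw [hz]; rfl
  | cons x xs ih =>
    intro cr cd h0 h3 h0' h3' hor
    by_cases h1 : x ≥ 3000
    · have hc : pvCat x = "radiant" := by simp [pvCat, h1]
      by_cases h4 : cr + 1 ≥ 4
      · -- cr = 3, hence cd = 0; the window at the head fires
        have hcr : cr = 3 := by omega
        have hcd : cd = 0 := by rcases hor with h | h <;> omega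
        subst hcr; subst hcd
        simp [pvRunScan, h1, hc, pvWin4, List.replicate]
      · have hcd0 : Int.toNat 0 = 0 := rfl
        rcases hor with hcr0 | hcd' 
        · -- cr = 0; skip the dire prefix
          subst hcr0
          simp only [pvRunScan, if_pos h1, if_neg h4]
          rw [ih (0 + 1) 0 (by omega) (by omega) (by omega) (by omega) (Or.inr rfl)]
          simp only [List.map_cons, hc, Int.toNat_zero, List.replicate_zero,
            List.nil_append, List.append_nil]
          rw [pvWin4_skip "dire" "radiant" (xs.map pvCat) cd.toNat (by omega) (by decide)]
          norm_num
        · -- cd = 0; extend the radiant prefix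
          subst hcd'
          simp only [pvRunScan, if_pos h1, if_neg h4]
          rw [ih (cr + 1) 0 (by omega) (by omega) (by omega) (by omega) (Or.inr rfl)]
          have : (cr + 1).toNat = cr.toNat + 1 := by omega
          rw [this, List.replicate_succ']
          simp [List.map_cons, hc, List.append_assoc]
    · by_cases h2 : x ≤ -3000
      · have hc : pvCat x = "dire" := by simp [pvCat, h1, h2]
        by_cases h4 : cd + 1 ≥ 4
        · have hcd : cd = 3 := by omega
          have hcr : cr = 0 := by rcases hor with h | h <;> omega
          subst hcd; subst hcr
          simp [pvRunScan, h1, h2, hc, pvWin4, List.replicate]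
        · rcases hor with hcr0 | hcd0
          · -- cr = 0; extend the dire prefix
            subst hcr0
            simp only [pvRunScan, if_neg h1, if_pos h2, if_neg h4]
            rw [ih 0 (cd + 1) (by omega) (by omega) (by omega) (by omega) (Or.inl rfl)]
            have : (cd + 1).toNat = cd.toNat + 1 := by omega
            rw [this, List.replicate_succ']
            simp [List.map_cons, hc, List.append_assoc]
          · -- cd = 0; skip the radiant prefix
            subst hcd0
            simp only [pvRunScan, if_neg h1, if_pos h2, if_neg h4]
            rw [ih 0 (0 + 1) (by omega) (by omega) (by omega) (by omega) (Or.inl rfl)]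
            simp only [List.map_cons, hc, Int.toNat_zero, List.replicate_zero,
              List.nil_append, List.append_nil]
            rw [pvWin4_skip "radiant" "dire" (xs.map pvCat) cr.toNat (by omega) (by decide)]
            norm_num
      · have hc : pvCat x = "neither" := by simp [pvCat, h1, h2]
        simp only [pvRunScan, if_neg h1, if_neg h2]
        rw [ih 0 0 (by omega) (by omega) (by omega) (by omega) (Or.inl rfl)]
        simp only [List.map_cons, hc, Int.toNat_zero, List.replicate_zero,
          List.nil_append, List.append_nil]
        have hdrop : ∀ ys, pvWin4 ("neither" :: ys) = pvWin4 ys := by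
          intro ys; simp [pvWin4]
        rcases hor with hcr0 | hcd0
        · subst hcr0
          simp only [Int.toNat_zero, List.replicate_zero, List.nil_append]
          rw [pvWin4_skip "dire" "neither" (xs.map pvCat) cd.toNat (by omega) (by decide),
            hdrop]
        · subst hcd0
          simp only [Int.toNat_zero, List.replicate_zero, List.append_nil]
          rw [pvWin4_skip "radiant" "neither" (xs.map pvCat) cr.toNat (by omega) (by decide),
            hdrop]

-- ===== VERDICT (by name: the statement is the Claim_ definition above) =====
theorem is_early_match_stable3k_4min_spec : Claim_equal_is_early_match_stable3k_4min := by
  intro match_ _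
  unfold Spec_is_early_match_stable3k_4min
  unfold is_early_match_stable3k_4min is_early_match_stable3k_4min_alt
  dsimp only
  split_ifs with hg
  · rfl
  · set leads := PySem.Dict.getD (⟨match_⟩ : PySem.Dict String (List Int))
      "radiantNetworthLeads" [] with hl
    have hlen : 30 ≤ leads.length := by omega
    have hmin : min (30 : Int) (leads.length : Int) = 30 := by omega
    have hslice : PySem.List.slice leads (some 15) (some 30) = (leads.drop 15).take 15 := by
      rw [PySem.List.slice_toNat leads (by norm_num) (by norm_num)]
      norm_num [Int.toNat]
    rw [hmin, hslice]
    have h1 := pvLoopA_eq_runScan leads 15 15 0 0 (by omega)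
    norm_num at h1
    rw [h1]
    have h2 := pvRunScan_eq_win4 ((leads.drop 15).take 15) 0 0 (by omega) (by omega)
      (by omega) (by omega) (Or.inl rfl)
    simpa using h2
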